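-- pv_equiv track=rewrite | github.com/raghu1199/DS-ALGO-COMPTETIVE_CODING- | COMPETETIVE_CODES/DSASHEET/purearr2.py | alteranatenegativePositive
-- ===== SOURCE A (Python) =====
-- def alteranatenegativePositive(arr):
--     neg=[]
--     pos=[]
--     for ele in arr:
--         if ele<0:
--             neg.append(ele)
--         else:
--             pos.append(ele)
--     out=[-1]*len(arr)
--     flag=False
--     k,l,r=0,0,0
--     while l<len(neg) and r<len(pos):
--         if flag==False:
--             out[k]=neg[l]
--             l+=1
--             flag=True
--         elif flag==True:
--             out[k]=pos[r]
--             r+=1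
--             flag=False
--         k+=1
--
--     while l<len(neg):
--         out[k]=neg[l]
--         l+=1
--         k+=1
--     while r<len(pos):
--         out[k]=pos[r]
--         r+=1
--         k+=1
--
--     return out
-- ===== SOURCE B (Python) =====
-- def alteranatenegativePositive(arr):
--     def extract(pred, xs):
--         for k, x in enumerate(xs):
--             if pred(x):
--                 return x, xs[:k] + xs[k+1:]
--         return None
--
--     out = []
--     rest = arr
--     while True:
--         en = extract(lambda x: x < 0, rest)
--         if en is None:
--             return out + rest
--         n, rest1 = en
--         ep = extract(lambda x: x >= 0, rest1)
--         if ep is None: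
--             return out + [n] + rest1
--         p, rest = ep
--         out.append(n)
--         out.append(p)
-- ===== Notes on version B (the rewrite author's own statement) =====
-- stated objective: alternative
-- what changed: Replaces A's partition-into-neg/pos-lists plus flag-driven fill of a preallocated array by a destructive-extraction loop: repeatedly extract the first negative and the first nonnegative from the remaining list, append the pair, and return the remainder when one kind runs out; no partition lists or index counters exist.
import Mathlib
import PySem

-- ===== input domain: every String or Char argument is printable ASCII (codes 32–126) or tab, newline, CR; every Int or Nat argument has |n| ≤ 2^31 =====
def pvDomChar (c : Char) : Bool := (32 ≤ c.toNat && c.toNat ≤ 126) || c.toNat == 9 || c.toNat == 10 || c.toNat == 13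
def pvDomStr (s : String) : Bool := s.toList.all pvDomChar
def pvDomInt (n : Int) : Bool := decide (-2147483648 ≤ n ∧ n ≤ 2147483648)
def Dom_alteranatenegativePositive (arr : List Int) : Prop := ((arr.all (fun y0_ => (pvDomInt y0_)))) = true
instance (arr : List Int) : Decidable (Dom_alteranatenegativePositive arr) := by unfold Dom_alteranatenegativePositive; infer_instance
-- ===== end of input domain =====

-- B replaces A's partition lists, flag state machine and preallocated output array by a
-- destructive-extraction loop (pull first negative, then first nonnegative, repeat);
-- objective: alternative (different algorithm, O(n^2) vs A's O(n)).


-- ===== PORT A =====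
-- partition loop: for ele in arr: if ele<0: neg.append(ele) else: pos.append(ele)
def pvPartitionA (arr : List Int) : List Int × List Int :=
  arr.foldl (fun (s : List Int × List Int) ele =>
    if ele < 0 then (s.1 ++ [ele], s.2) else (s.1, s.2 ++ [ele])) ([], [])

-- first while loop: while l<len(neg) and r<len(pos), flag alternates neg/pos writes
-- (neg[l] / pos[r] are always in range here, so getD is exact for Python's indexing)
def pvLoop1 (neg pos out : List Int) (flag : Bool) (k l r : Nat) :
    List Int × Nat × Nat × Nat :=
  if h : l < neg.length ∧ r < pos.length then
    if flag = false then
      pvLoop1 neg pos (out.set k (neg.getD l 0)) true (k+1) (l+1) r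
    else
      pvLoop1 neg pos (out.set k (pos.getD r 0)) false (k+1) l (r+1)
  else (out, k, l, r)
termination_by (neg.length - l) + (pos.length - r)
decreasing_by all_goals omega

-- drain loop: while i<len(xs): out[k]=xs[i]; i+=1; k+=1  (used for both tail loops of A)
def pvLoop2 (xs out : List Int) (k i : Nat) : List Int × Nat × Nat :=
  if i < xs.length then
    pvLoop2 xs (out.set k (xs.getD i 0)) (k+1) (i+1)
  else (out, k, i)
termination_by xs.length - i

def alteranatenegativePositive (arr : List Int) : List Int :=
  let np := pvPartitionA arr
  let neg := np.1
  let pos := np.2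
  let out0 := List.replicate arr.length (-1)
  let s1 := pvLoop1 neg pos out0 false 0 0 0
  let s2 := pvLoop2 neg s1.1 s1.2.1 s1.2.2.1
  let s3 := pvLoop2 pos s2.1 s2.2.1 s1.2.2.2
  s3.1

-- ===== PORT B =====
-- extract(pred, xs): first element satisfying pred together with the list without it
def pvExtract (pred : Int → Bool) : List Int → Option (Int × List Int)
  | [] => none
  | x :: xs =>
    if pred x then some (x, xs)
    else
      match pvExtract pred xs with
      | none => none
      | some (v, rest) => some (v, x :: rest)

-- the while loop of B: out accumulates pairs, rest shrinks by two each round.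
-- fuel = length of the remaining list makes the recursion structural; it is never
-- exhausted on the calls the port makes (each round consumes one fuel, two elements)
def pvAltGo (fuel : Nat) (out rest : List Int) : List Int :=
  match fuel with
  | 0 => out ++ rest
  | fuel' + 1 =>
    match pvExtract (fun x => decide (x < 0)) rest with
    | none => out ++ rest
    | some (n, rest1) =>
      match pvExtract (fun x => decide (0 ≤ x)) rest1 with
      | none => out ++ [n] ++ rest1
      | some (p, rest2) => pvAltGo fuel' (out ++ [n, p]) rest2

def alteranatenegativePositive_alt (arr : List Int) : List Int :=
  pvAltGo arr.length [] arr

-- ===== PRECONDITION & SPEC =====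
def Spec_alteranatenegativePositive (arr : List Int) (out : List Int) : Prop := out = alteranatenegativePositive_alt arr
instance (arr : List Int) (out : List Int) : Decidable (Spec_alteranatenegativePositive arr out) := by unfold Spec_alteranatenegativePositive; infer_instance

-- ===== CLAIM (what is proved, stated in full; the proofs are below) =====
def Claim_equal_alteranatenegativePositive : Prop := ∀ (arr : List Int), Dom_alteranatenegativePositive arr → Spec_alteranatenegativePositive arr (alteranatenegativePositive arr)

-- ===== LEMMAS AND PROOFS =====

-- the neg-first interleaving both programs produce, the proof's common midpoint
def pvWeave (n p : List Int) : List Int :=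
  match n, p with
  | [], p => p
  | n, [] => n
  | a :: n', b :: p' => a :: b :: pvWeave n' p'

theorem pvWeave_nil_right (n : List Int) : pvWeave n [] = n := by
  cases n <;> rfl

-- ---------- A-side: A's pipeline computes pvWeave of the partition ----------

theorem pvPartition_spec (arr : List Int) (n p : List Int) :
    arr.foldl (fun (s : List Int × List Int) ele =>
      if ele < 0 then (s.1 ++ [ele], s.2) else (s.1, s.2 ++ [ele])) (n, p)
      = (n ++ arr.filter (fun x => decide (x < 0)),
         p ++ arr.filter (fun x => decide (0 ≤ x))) := by
  induction arr generalizing n p with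
  | nil => simp
  | cons a t ih =>
    by_cases h : a < 0
    · simp [List.foldl, h, ih, show ¬ (0 ≤ a) by omega]
    · simp [List.foldl, h, ih, show (0 ≤ a) by omega]

theorem pvSet_append (done : List Int) (x v : Int) (t : List Int) :
    (done ++ x :: t).set done.length v = done ++ v :: t := by
  induction done with
  | nil => simp
  | cons d ds ih => simp [ih]

theorem pvLoop2_spec (xs : List Int) :
    ∀ (rest done : List Int) (i : Nat), rest.length + i = xs.length →
      pvLoop2 xs (done ++ rest) done.length i
        = (done ++ xs.drop i, done.length + rest.length, xs.length) := by
  intro rest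
  induction rest with
  | nil =>
    intro done i hlen
    unfold pvLoop2
    simp at hlen
    simp [hlen, List.drop_length]
  | cons y t ih =>
    intro done i hlen
    have hi : i < xs.length := by simp at hlen; omega
    unfold pvLoop2
    rw [if_pos hi]
    have hset : (done ++ y :: t).set done.length (xs.getD i 0) = done ++ xs.getD i 0 :: t :=
      pvSet_append done y _ t
    have hlen2 : t.length + (i+1) = xs.length := by simp at hlen; omega
    have := ih (done ++ [xs.getD i 0]) (i+1) hlen2
    simp only [show done ++ xs.getD i 0 :: t = (done ++ [xs.getD i 0]) ++ t by simp] at hset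
    rw [hset, show done.length + 1 = (done ++ [xs.getD i 0]).length by simp, this]
    have hdrop : xs.drop i = xs.getD i 0 :: xs.drop (i+1) := by
      rw [List.getD_eq_getElem xs 0 hi, List.drop_eq_getElem_cons hi]
    simp [hdrop]
    omega

-- the whole pipeline after the partition, parametrised by a done-prefix
def pvComb (neg pos out : List Int) (flag : Bool) (k l r : Nat) : List Int :=
  (pvLoop2 pos
    (pvLoop2 neg (pvLoop1 neg pos out flag k l r).1
      (pvLoop1 neg pos out flag k l r).2.1 (pvLoop1 neg pos out flag k l r).2.2.1).1
    (pvLoop2 neg (pvLoop1 neg pos out flag k l r).1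
      (pvLoop1 neg pos out flag k l r).2.1 (pvLoop1 neg pos out flag k l r).2.2.1).2.1
    (pvLoop1 neg pos out flag k l r).2.2.2).1

theorem pvLoop2_done (xs out : List Int) (k i : Nat) (h : xs.length ≤ i) :
    pvLoop2 xs out k i = (out, k, i) := by
  unfold pvLoop2; rw [if_neg (by omega)]

theorem pvComb_spec (neg pos : List Int) :
    ∀ (m : Nat) (rest done : List Int) (l r : Nat), rest.length = m →
      rest.length + l + r = neg.length + pos.length →
      l ≤ neg.length → r ≤ pos.length →
      pvComb neg pos (done ++ rest) false done.length l r
        = done ++ pvWeave (neg.drop l) (pos.drop r) := by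
  intro m
  induction m using Nat.strong_induction_on with
  | _ m ih =>
    intro rest done l r hm hlen hl hr
    by_cases hcond : l < neg.length ∧ r < pos.length
    · obtain ⟨hl1, hr1⟩ := hcond
      cases rest with
      | nil => exfalso; simp at hm hlen; omega
      | cons y t =>
        unfold pvComb pvLoop1
        rw [dif_pos ⟨hl1, hr1⟩, if_pos rfl]
        rw [pvSet_append done y _ t]
        by_cases hl2 : l + 1 < neg.length
        · cases t with
          | nil => exfalso; simp at hm hlen; omega
          | cons z t2 =>
            unfold pvLoop1
            rw [dif_pos ⟨hl2, hr1⟩]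
            simp only [Bool.true_eq_false, if_false]
            have hset2 : (done ++ [neg.getD l 0] ++ z :: t2).set (done.length + 1)
                (pos.getD r 0) = done ++ [neg.getD l 0, pos.getD r 0] ++ t2 := by
              have h := pvSet_append (done ++ [neg.getD l 0]) z (pos.getD r 0) t2
              simp only [List.length_append, List.length_cons, List.length_nil] at h
              simp only [List.append_assoc, List.cons_append, List.nil_append] at h ⊢
              exact h
            rw [show done ++ neg.getD l 0 :: z :: t2
                  = done ++ [neg.getD l 0] ++ z :: t2 by simp, hset2]
            have hih := ih (m - 2) (by omega) t2
              (done ++ [neg.getD l 0, pos.getD r 0]) (l+1) (r+1)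
              (by simp at hm ⊢; omega) (by simp at hlen ⊢; omega) (by omega) (by omega)
            unfold pvComb at hih
            rw [show done.length + 1 + 1 = (done ++ [neg.getD l 0, pos.getD r 0]).length by
                  simp]
            rw [show done ++ [neg.getD l 0, pos.getD r 0] ++ t2
                  = (done ++ [neg.getD l 0, pos.getD r 0]) ++ t2 by simp]
            rw [hih]
            rw [List.drop_eq_getElem_cons hl1, List.drop_eq_getElem_cons hr1]
            simp only [pvWeave, List.getD, List.getElem?_eq_getElem hl1,
              List.getElem?_eq_getElem hr1, Option.getD_some, List.append_assoc,
              List.cons_append, List.nil_append]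
        · have hl2' : l + 1 = neg.length := by omega
          unfold pvLoop1
          rw [dif_neg (by omega)]
          dsimp only
          have hrest : t.length + r = pos.length := by simp at hm hlen; omega
          rw [show done ++ neg.getD l 0 :: t = (done ++ [neg.getD l 0]) ++ t by simp]
          rw [pvLoop2_done neg _ _ (l+1) (by omega)]
          rw [show done.length + 1 = (done ++ [neg.getD l 0]).length by simp]
          have h3 := pvLoop2_spec pos t (done ++ [neg.getD l 0]) r hrest
          rw [h3]
          rw [List.drop_eq_getElem_cons hl1, hl2', List.drop_length]
          have hpr : r < pos.length := hr1
          rw [List.drop_eq_getElem_cons hpr]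
          simp only [pvWeave, List.getD, List.getElem?_eq_getElem hl1, Option.getD_some,
            List.append_assoc, List.cons_append, List.nil_append]
    · unfold pvComb pvLoop1
      rw [dif_neg hcond]
      dsimp only
      by_cases hln : l < neg.length
      · have hr' : r = pos.length := by omega
        have hrest : rest.length + l = neg.length := by omega
        have h2 := pvLoop2_spec neg rest done l hrest
        rw [h2]
        rw [pvLoop2_done pos _ _ r (by omega)]
        rw [hr', List.drop_length, pvWeave_nil_right]
      · have hl' : l = neg.length := by omega
        have hrest : rest.length + r = pos.length := by omega
        rw [pvLoop2_done neg _ _ l (by omega)]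
        have h3 := pvLoop2_spec pos rest done r hrest
        rw [h3]
        rw [hl', List.drop_length]
        simp [pvWeave]

theorem pvFilterLen (arr : List Int) : (arr.filter (fun x => decide (x < 0))).length
    + (arr.filter (fun x => decide (0 ≤ x))).length = arr.length := by
  induction arr with
  | nil => rfl
  | cons a t iht =>
    by_cases h : a < 0
    · have h2 : ¬ (0 ≤ a) := by omega
      simp [h, h2]; omega
    · have h2 : (0 ≤ a) := by omega
      simp [h, h2]; omega

theorem pvA_weave (arr : List Int) :
    alteranatenegativePositive arr
      = pvWeave (arr.filter (fun x => decide (x < 0)))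
          (arr.filter (fun x => decide (0 ≤ x))) := by
  unfold alteranatenegativePositive
  have hpart := pvPartition_spec arr [] []
  simp only [List.nil_append] at hpart
  unfold pvPartitionA
  rw [hpart]
  have hlen := pvFilterLen arr
  have := pvComb_spec (arr.filter (fun x => decide (x < 0)))
    (arr.filter (fun x => decide (0 ≤ x))) arr.length
    (List.replicate arr.length (-1)) [] 0 0
    (by simp) (by simp; omega) (by omega) (by omega)
  unfold pvComb at this
  simp only [List.nil_append, List.length_nil] at this
  simpa using this

-- ---------- B-side: the extraction loop computes pvWeave of the filters ----------

theorem pvExtract_none (pred : Int → Bool) :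
    ∀ (xs : List Int), pvExtract pred xs = none → xs.filter pred = [] := by
  intro xs
  induction xs with
  | nil => intro _; rfl
  | cons x t ih =>
    intro h
    by_cases hp : pred x = true
    · simp [pvExtract, hp] at h
    · simp only [pvExtract, hp] at h
      cases he : pvExtract pred t with
      | none => simp [List.filter, hp, ih he]
      | some pr => rw [he] at h; simp at h
  
theorem pvExtract_some (pred : Int → Bool) (q : Int → Bool)
    (hpq : ∀ x, pred x = true → q x = false) :
    ∀ (xs : List Int) (v : Int) (rest : List Int),
      pvExtract pred xs = some (v, rest) →
      xs.filter pred = v :: rest.filter pred ∧ xs.filter q = rest.filter q := by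
  intro xs
  induction xs with
  | nil => intro v rest h; simp [pvExtract] at h
  | cons x t ih =>
    intro v rest h
    by_cases hp : pred x = true
    · simp [pvExtract, hp] at h
      obtain ⟨hv, hr⟩ := h
      subst hv; subst hr
      simp [List.filter, hp, hpq x hp]
    · simp only [pvExtract, hp] at h
      cases he : pvExtract pred t with
      | none => rw [he] at h; simp at h
      | some pr =>
        rw [he] at h
        simp at h
        obtain ⟨hv, hr⟩ := h
        have := ih pr.1 pr.2 (by rw [he])
        subst hv
        rw [← hr]
        constructor
        · simp [List.filter, hp, this.1]
        · by_cases hq : q x = true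
          · simp [List.filter, hq, this.2]
          · simp [List.filter, hq, this.2]

-- every element fails (·<0) iff it satisfies (0≤·), so an all-one-kind list equals its filter
theorem pvFilter_pos_of_no_neg (xs : List Int)
    (h : xs.filter (fun x => decide (x < 0)) = []) :
    xs.filter (fun x => decide (0 ≤ x)) = xs := by
  rw [List.filter_eq_self]
  intro a ha
  have := List.filter_eq_nil_iff.mp h a ha
  simp at this ⊢
  omega

theorem pvFilter_neg_of_no_pos (xs : List Int)
    (h : xs.filter (fun x => decide (0 ≤ x)) = []) :
    xs.filter (fun x => decide (x < 0)) = xs := by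
  rw [List.filter_eq_self]
  intro a ha
  have := List.filter_eq_nil_iff.mp h a ha
  simp at this ⊢
  omega

theorem pvExtract_length (pred : Int → Bool) :
    ∀ (xs : List Int) (v : Int) (rest : List Int),
      pvExtract pred xs = some (v, rest) → rest.length + 1 = xs.length := by
  intro xs
  induction xs with
  | nil => intro v rest h; simp [pvExtract] at h
  | cons x t ih =>
    intro v rest h
    by_cases hp : pred x = true
    · simp [pvExtract, hp] at h
      simp [← h.2]
    · simp only [pvExtract, hp] at h
      cases he : pvExtract pred t with
      | none => rw [he] at h; simp at h
      | some pr =>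
        rw [he] at h
        simp at h
        have := ih pr.1 pr.2 (by rw [he])
        simp [← h.2, this]

theorem pvAltGo_weave :
    ∀ (fuel : Nat) (rest out : List Int), rest.length ≤ fuel →
      pvAltGo fuel out rest
        = out ++ pvWeave (rest.filter (fun x => decide (x < 0)))
            (rest.filter (fun x => decide (0 ≤ x))) := by
  intro fuel
  induction fuel with
  | zero =>
    intro rest out hle
    have : rest = [] := List.eq_nil_of_length_eq_zero (by omega)
    subst this
    simp [pvAltGo, pvWeave]
  | succ fuel ih =>
    intro rest out hle
    unfold pvAltGo
    cases hn : pvExtract (fun x => decide (x < 0)) rest with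
    | none =>
      have hfn := pvExtract_none _ _ hn
      rw [hfn]
      simp [pvWeave, pvFilter_pos_of_no_neg rest hfn]
    | some pr =>
      obtain ⟨n, rest1⟩ := pr
      have hs := pvExtract_some (fun x => decide (x < 0)) (fun x => decide (0 ≤ x))
        (by intro x hx; simp at hx ⊢; omega) rest n rest1 hn
      have hl1 := pvExtract_length _ _ _ _ hn
      cases hp : pvExtract (fun x => decide (0 ≤ x)) rest1 with
      | none =>
        have hfp := pvExtract_none _ _ hp
        simp only [hp]
        rw [hs.1, hs.2, hfp]
        simp [pvWeave, pvFilter_neg_of_no_pos rest1 hfp]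
      | some pr2 =>
        obtain ⟨p, rest2⟩ := pr2
        have hs2 := pvExtract_some (fun x => decide (0 ≤ x)) (fun x => decide (x < 0))
          (by intro x hx; simp at hx ⊢; omega) rest1 p rest2 hp
        have hl2 := pvExtract_length _ _ _ _ hp
        simp only [hp]
        rw [ih rest2 (out ++ [n, p]) (by omega)]
        rw [hs.1, hs.2, hs2.1, hs2.2]
        simp [pvWeave]

-- ===== VERDICT (by name: the statement is the Claim_ definition above) =====
theorem alteranatenegativePositive_spec : Claim_equal_alteranatenegativePositive := by
  intro arr _
  unfold Spec_alteranatenegativePositive alteranatenegativePositive_alt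
  rw [pvA_weave, pvAltGo_weave arr.length arr [] (le_refl _)]
  simp
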